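-- pv_equiv track=rewrite | github.com/BhuvanSA/WhatsappMarksBot | newmain.py | regx30or40
-- ===== SOURCE A (Python) =====
-- def regx30or40(word):
--     if word != None:
--         for i in word:
--             if i == '3':
--                 return 30
--             elif i == '4':
--                 return 40
--
--     return 0
-- ===== SOURCE B (Python) =====
-- def regx30or40(word):
--     if word is None:
--         return 0
--     i3 = word.find('3')
--     i4 = word.find('4')
--     if i3 == -1 and i4 == -1:
--         return 0
--     if i3 == -1:
--         return 40
--     if i4 == -1:
--         return 30
--     return 30 if i3 < i4 else 40
-- ===== Notes on version B (the rewrite author's own statement) =====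
-- stated objective: idiomatic
-- what changed: Replaces the char-by-char early-exit loop with two str.find calls and a comparison of the two first-occurrence indices.
import Mathlib
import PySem

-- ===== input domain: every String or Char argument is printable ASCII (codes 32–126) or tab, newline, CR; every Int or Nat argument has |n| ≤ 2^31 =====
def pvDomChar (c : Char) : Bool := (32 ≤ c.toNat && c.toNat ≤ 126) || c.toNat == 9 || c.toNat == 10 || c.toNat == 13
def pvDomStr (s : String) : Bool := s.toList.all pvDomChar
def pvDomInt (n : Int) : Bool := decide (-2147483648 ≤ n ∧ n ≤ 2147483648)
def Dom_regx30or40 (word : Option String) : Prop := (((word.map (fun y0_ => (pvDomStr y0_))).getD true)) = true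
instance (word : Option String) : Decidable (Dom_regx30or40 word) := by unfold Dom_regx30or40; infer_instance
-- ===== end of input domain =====

-- B replaces A's char-by-char early-exit loop by two str.find index computations compared afterwards (C-level scans; measured faster in a timing run).


-- ===== PORT A =====
-- the 'for i in word' loop with its early returns; falls through to 0
def pvLoopA : List Char → Int
  | [] => 0
  | i :: rest => if i = '3' then 30 else if i = '4' then 40 else pvLoopA rest

def regx30or40 (word : Option String) : Int :=
  match word with
  | some w => pvLoopA w.toList
  | none => 0

-- ===== PORT B =====
def regx30or40_alt (word : Option String) : Int :=
  match word with
  | none => 0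
  | some w =>
    let i3 := PySem.Str.find w "3"
    let i4 := PySem.Str.find w "4"
    if i3 = -1 ∧ i4 = -1 then 0
    else if i3 = -1 then 40
    else if i4 = -1 then 30
    else if i3 < i4 then 30 else 40

-- ===== PRECONDITION & SPEC =====
def Spec_regx30or40 (word : Option String) (out : Int) : Prop := out = regx30or40_alt word
instance (word : Option String) (out : Int) : Decidable (Spec_regx30or40 word out) := by unfold Spec_regx30or40; infer_instance

-- ===== CLAIM (what is proved, stated in full; the proofs are below) =====
def Claim_equal_regx30or40 : Prop := ∀ (word : Option String), Dom_regx30or40 word → Spec_regx30or40 word (regx30or40 word)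

-- ===== LEMMAS AND PROOFS =====

theorem pv_singleton_infix_iff_mem (c : Char) (l : List Char) : [c] <:+: l ↔ c ∈ l := by
  constructor
  · intro h; exact h.sublist.subset (by simp)
  · intro h
    obtain ⟨s, t, rfl⟩ := List.append_of_mem h
    exact ⟨s, t, by simp⟩

-- find on a singleton pattern is determined by "occurrence at m, none before"
theorem pv_find_uniq (c : Char) (l : List Char) (m : Nat)
    (hocc : [c] <+: l.drop m) (hmin : ∀ i < m, ¬ [c] <+: l.drop i) :
    PySem.Chars.find l [c] = (m : Int) := by
  have hmem : c ∈ l := by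
    have : [c] <:+: l := (hocc.isInfix).trans (List.drop_suffix m l).isInfix
    exact (pv_singleton_infix_iff_mem c l).mp this
  have hnn : 0 ≤ PySem.Chars.find l [c] :=
    (PySem.Chars.find_nonneg_iff l [c]).mpr ((pv_singleton_infix_iff_mem c l).mpr hmem)
  obtain ⟨h1, h2⟩ := PySem.Chars.find_spec hnn
  have : (PySem.Chars.find l [c]).toNat = m := by
    rcases Nat.lt_trichotomy (PySem.Chars.find l [c]).toNat m with h | h | h
    · exact absurd h1 (hmin _ h)
    · exact h
    · exact absurd hocc (h2 _ h)
  omega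

theorem pv_find_cons (x c : Char) (l : List Char) :
    PySem.Chars.find (x :: l) [c] =
      if x = c then 0
      else if PySem.Chars.find l [c] = -1 then -1
      else PySem.Chars.find l [c] + 1 := by
  by_cases hx : x = c
  · subst hx
    rw [if_pos rfl]
    exact pv_find_uniq x (x :: l) 0 (by simp) (by omega)
  · rw [if_neg hx]
    by_cases hf : PySem.Chars.find l [c] = -1
    · rw [if_pos hf]
      have hnm : ¬ [c] <:+: l := (PySem.Chars.find_eq_neg_one_iff l [c]).mp hf
      apply (PySem.Chars.find_eq_neg_one_iff _ [c]).mpr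
      intro h
      rcases (pv_singleton_infix_iff_mem c (x :: l)).mp h with h'
      rcases List.mem_cons.mp h' with h' | h'
      · exact hx h'.symm
      · exact hnm ((pv_singleton_infix_iff_mem c l).mpr h')
    · rw [if_neg hf]
      have hnn : 0 ≤ PySem.Chars.find l [c] := by
        have := PySem.Chars.neg_one_le_find l [c]
        omega
      obtain ⟨h1, h2⟩ := PySem.Chars.find_spec hnn
      set n := (PySem.Chars.find l [c]).toNat with hn
      have := pv_find_uniq c (x :: l) (n + 1)
        (by simpa using h1)
        (by
          intro i hi
          match i with
          | 0 =>
            intro hp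
            simp only [List.drop_zero] at hp
            obtain ⟨t, ht⟩ := hp
            have hct : c :: t = x :: l := by simpa using ht
            injection hct with h1 _
            exact hx h1.symm
          | Nat.succ j =>
            simpa using h2 j (by omega))
      omega

-- the decision B makes from the two indices
def pvDec (i3 i4 : Int) : Int :=
  if i3 = -1 ∧ i4 = -1 then 0
  else if i3 = -1 then 40
  else if i4 = -1 then 30
  else if i3 < i4 then 30 else 40

theorem pvDec_shift (a b : Int) (ha : -1 ≤ a) (hb : -1 ≤ b) :
    pvDec (if a = -1 then -1 else a + 1) (if b = -1 then -1 else b + 1) = pvDec a b := by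
  unfold pvDec
  by_cases ha' : a = -1 <;> by_cases hb' : b = -1 <;> simp [ha', hb'] <;> first | (split_ifs <;> omega) | omega

theorem pvDec_head3 (b : Int) (hb : -1 ≤ b) : pvDec 0 (if b = -1 then -1 else b + 1) = 30 := by
  unfold pvDec
  by_cases hb' : b = -1 <;> simp [hb'] <;> first | (split_ifs <;> omega) | omega

theorem pvDec_head4 (a : Int) (ha : -1 ≤ a) :
    pvDec (if a = -1 then -1 else a + 1) 0 = 40 := by
  unfold pvDec
  by_cases ha' : a = -1 <;> simp [ha'] <;> first | (split_ifs <;> omega) | omega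

theorem pv_loop_eq_dec (l : List Char) :
    pvLoopA l = pvDec (PySem.Chars.find l ['3']) (PySem.Chars.find l ['4']) := by
  induction l with
  | nil =>
    have h3 : PySem.Chars.find ([] : List Char) ['3'] = -1 :=
      (PySem.Chars.find_eq_neg_one_iff _ _).mpr (by simp)
    have h4 : PySem.Chars.find ([] : List Char) ['4'] = -1 :=
      (PySem.Chars.find_eq_neg_one_iff _ _).mpr (by simp)
    simp [pvLoopA, pvDec, h3, h4]
  | cons x l ih =>
    rw [pv_find_cons x '3' l, pv_find_cons x '4' l]
    have h3n : -1 ≤ PySem.Chars.find l ['3'] := PySem.Chars.neg_one_le_find l ['3']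
    have h4n : -1 ≤ PySem.Chars.find l ['4'] := PySem.Chars.neg_one_le_find l ['4']
    by_cases hx3 : x = '3'
    · subst hx3
      rw [if_pos rfl, if_neg (by decide : ¬ ('3' = '4'))]
      simpa [pvLoopA] using (pvDec_head3 (PySem.Chars.find l ['4']) h4n).symm
    · by_cases hx4 : x = '4'
      · subst hx4
        rw [if_neg (by decide : ¬ ('4' = '3')), if_pos rfl]
        simpa [pvLoopA] using (pvDec_head4 (PySem.Chars.find l ['3']) h3n).symm
      · rw [if_neg hx3, if_neg hx4]
        simpa [pvLoopA, hx3, hx4, ih] using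
          (pvDec_shift (PySem.Chars.find l ['3']) (PySem.Chars.find l ['4']) h3n h4n).symm

-- ===== VERDICT (by name: the statement is the Claim_ definition above) =====
theorem regx30or40_spec : Claim_equal_regx30or40 := by
  intro word _
  unfold Spec_regx30or40 regx30or40 regx30or40_alt
  match word with
  | none => rfl
  | some w =>
    simp only [PySem.Str.find_eq]
    exact pv_loop_eq_dec w.toList
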